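-- pv_equiv track=rewrite | github.com/broersma/advent-of-code-2021-python | 3_2.py | calculate_g_e
-- ===== SOURCE A (Python) =====
-- def calculate_g_e(entries):
--     g = [0] * 12
--     for entry in entries:
--         num = [(1 if x == '1' else -1) for x in entry]
--
--         for i,b in enumerate(num):
--             g[i] += b
--
--     gamma = ['0' if x < 0 else '1' for x in g]
--     epsilon = ['0' if x >= 0 else '1' for x in g]
--
--     return gamma, epsilon
-- ===== SOURCE B (Python) =====
-- def calculate_g_e(entries):
--     cols = [''.join(e[i] for e in entries if i < len(e)) for i in range(12)]
--     gamma = ['1' if 2 * c.count('1') >= len(c) else '0' for c in cols]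
--     epsilon = ['0' if 2 * c.count('1') >= len(c) else '1' for c in cols]
--     return gamma, epsilon
-- ===== Notes on version B (the rewrite author's own statement) =====
-- stated objective: alternative
-- what changed: B materializes the transpose: it builds the 12 column strings and decides each bit by counting '1' characters in the column (2*ones >= column length), instead of A's running signed accumulator array updated row by row and thresholded at zero.
import Mathlib
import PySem

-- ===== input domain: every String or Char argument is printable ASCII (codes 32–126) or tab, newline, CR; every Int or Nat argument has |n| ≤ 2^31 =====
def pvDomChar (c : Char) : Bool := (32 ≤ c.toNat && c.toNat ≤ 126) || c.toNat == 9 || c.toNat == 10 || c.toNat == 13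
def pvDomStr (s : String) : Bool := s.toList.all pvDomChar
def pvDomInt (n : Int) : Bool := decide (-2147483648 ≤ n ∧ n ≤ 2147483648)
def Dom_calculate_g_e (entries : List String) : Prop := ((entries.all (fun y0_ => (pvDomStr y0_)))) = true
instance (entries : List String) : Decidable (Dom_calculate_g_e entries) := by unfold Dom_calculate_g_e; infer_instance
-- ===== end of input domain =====

-- B transposes the input into the 12 column strings and decides each bit by counting '1's
-- (2*ones >= column length) instead of A's running signed accumulator; objective: alternative.

-- ===== PORT A =====
-- one iteration of A's outer loop: num = [...]; for i,b in enumerate(num): g[i] += b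
def calcStep (g : List Int) (entry : String) : List Int :=
  let num := entry.toList.map (fun x => if x = '1' then (1 : Int) else -1)
  (PySem.List.enumerate num).foldl
    (fun g p => PySem.List.pySetD g p.1 (PySem.List.pyGetD g p.1 0 + p.2)) g

def calculate_g_e (entries : List String) : List String × List String :=
  let g : List Int := List.replicate 12 0
  let g := entries.foldl calcStep g
  let gamma := g.map (fun x => if x < 0 then "0" else "1")
  let epsilon := g.map (fun x => if 0 ≤ x then "0" else "1")
  (gamma, epsilon)

-- ===== PORT B =====
-- ''.join(e[i] for e in entries if i < len(e)) as its character list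
def colChars (entries : List String) (i : Nat) : List Char :=
  entries.filterMap (fun e => if i < e.toList.length then some (e.toList.getD i ' ') else none)

def calculate_g_e_alt (entries : List String) : List String × List String :=
  let cols := (List.range 12).map (fun i => colChars entries i)
  let gamma := cols.map (fun c => if c.length ≤ 2 * c.count '1' then "1" else "0")
  let epsilon := cols.map (fun c => if c.length ≤ 2 * c.count '1' then "0" else "1")
  (gamma, epsilon)

-- ===== PRECONDITION & SPEC =====
-- Pre_ excludes entries longer than 12 characters: there A's `g[i] += b` raises IndexError.
def Pre_calculate_g_e (entries : List String) : Prop := ∀ e ∈ entries, e.toList.length ≤ 12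

instance (entries : List String) : Decidable (Pre_calculate_g_e entries) := by
  unfold Pre_calculate_g_e; infer_instance

def pvWitness_calculate_g_e : List String := ["101100110010", "0110", ""]

def Spec_calculate_g_e (entries : List String) (out : List String × List String) : Prop :=
  out = calculate_g_e_alt entries

instance (entries : List String) (out : List String × List String) : Decidable (Spec_calculate_g_e entries out) := by
  unfold Spec_calculate_g_e; infer_instance

-- ===== CLAIM (what is proved, stated in full; the proofs are below) =====
def Claim_equal_calculate_g_e : Prop :=
  ∀ (entries : List String), Dom_calculate_g_e entries → Pre_calculate_g_e entries →
    Spec_calculate_g_e entries (calculate_g_e entries)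

-- ===== LEMMAS AND PROOFS =====

-- the net contribution of column j as A accumulates it, expressed as a sum
def colsum (j : Nat) (entries : List String) : Int :=
  (entries.map (fun e =>
    if j < e.toList.length then (if e.toList.getD j ' ' = '1' then (1 : Int) else -1) else 0)).sum

-- A's signed tally equals twice the ones-count minus the column length (B's quantities)
lemma colsum_eq_count (j : Nat) : ∀ (entries : List String),
    colsum j entries = 2 * ((colChars entries j).count '1' : Int) - (colChars entries j).length := by
  intro entries
  induction entries with
  | nil => simp [colsum, colChars]
  | cons e rest ih =>
    simp only [colsum, colChars, List.map_cons, List.sum_cons, List.filterMap_cons] at *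
    by_cases hj : j < e.toList.length
    · rw [if_pos hj, if_pos hj]
      by_cases h1 : e.toList.getD j ' ' = '1'
      · simp only [h1, List.count_cons, List.length_cons, ih]
        simp only [beq_self_eq_true, if_pos]
        push_cast; ring
      · rw [if_neg h1]
        simp only [List.count_cons, List.length_cons, ih]
        rw [if_neg (by simpa using h1)]
        push_cast; ring
    · rw [if_neg hj, if_neg hj, ih]; ring

-- A's inner loop `for i,b in enumerate(num): g[i] += b`, started at offset k
lemma inner_fold (l : List Int) : ∀ (k : Nat) (g : List Int), k + l.length ≤ g.length →
    ((PySem.List.enumerate l (k : Int)).foldl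
        (fun g p => PySem.List.pySetD g p.1 (PySem.List.pyGetD g p.1 0 + p.2)) g).length = g.length ∧
      ∀ j : Nat,
        ((PySem.List.enumerate l (k : Int)).foldl
            (fun g p => PySem.List.pySetD g p.1 (PySem.List.pyGetD g p.1 0 + p.2)) g).getD j 0 =
          if k ≤ j ∧ j < k + l.length then g.getD j 0 + l.getD (j - k) 0 else g.getD j 0 := by
  induction l with
  | nil =>
    intro k g _
    refine ⟨by simp [PySem.List.enumerate_nil], fun j => ?_⟩
    rw [PySem.List.enumerate_nil]
    simp only [List.foldl_nil, List.length_nil]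
    rw [if_neg (by omega)]
  | cons b l ih =>
    intro k g hlen
    simp only [List.length_cons] at hlen
    have hk : k < g.length := by omega
    rw [PySem.List.enumerate_cons]
    have hcast : (k : Int) + 1 = ((k + 1 : Nat) : Int) := by push_cast; ring
    simp only [List.foldl_cons, PySem.List.pySetD_natCast, PySem.List.pyGetD_natCast, hcast]
    set g' := g.set k (g.getD k 0 + b) with hg'
    have hlen' : g'.length = g.length := by simp [hg']
    obtain ⟨ihlen, ihget⟩ := ih (k + 1) g' (by rw [hlen']; omega)
    have hset : ∀ j : Nat, g'.getD j 0 = if j = k then g.getD k 0 + b else g.getD j 0 := by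
      intro j
      by_cases hjk : j = k
      · subst hjk; simp [hg', List.getD, hk]
      · simp [hg', List.getD, Ne.symm hjk, hjk]
    refine ⟨by rw [ihlen, hlen'], fun j => ?_⟩
    rw [ihget j, hset j]
    simp only [List.length_cons]
    by_cases h1 : k + 1 ≤ j ∧ j < k + 1 + l.length
    · rw [if_pos h1, if_neg (show ¬ j = k by omega),
        if_pos (show k ≤ j ∧ j < k + (l.length + 1) by omega)]
      have hidx : j - k = (j - (k + 1)) + 1 := by omega
      rw [hidx, List.getD_cons_succ]
    · rw [if_neg h1]
      by_cases hjk : j = k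
      · rw [if_pos hjk, hjk, if_pos (show k ≤ k ∧ k < k + (l.length + 1) by omega)]
        simp
      · rw [if_neg hjk, if_neg (show ¬ (k ≤ j ∧ j < k + (l.length + 1)) by omega)]

lemma outer_fold : ∀ (entries : List String) (g : List Int),
    (∀ e ∈ entries, e.toList.length ≤ 12) → g.length = 12 →
    (entries.foldl calcStep g).length = 12 ∧
      ∀ j : Nat, (entries.foldl calcStep g).getD j 0 = g.getD j 0 + colsum j entries := by
  intro entries
  induction entries with
  | nil => intro g _ hg; exact ⟨hg, fun j => by simp [colsum]⟩
  | cons e rest ih =>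
    intro g hpre hg
    have he : e.toList.length ≤ 12 := hpre e (by simp)
    obtain ⟨slen, sget⟩ := inner_fold (e.toList.map (fun x => if x = '1' then (1 : Int) else -1))
      0 g (by simp only [List.length_map]; omega)
    simp only [Nat.cast_zero] at slen sget
    have hstep_len : (calcStep g e).length = 12 := by
      simp only [calcStep]; rw [slen, hg]
    have hstep_get : ∀ j : Nat, (calcStep g e).getD j 0 =
        g.getD j 0 + (if j < e.toList.length then
          (if e.toList.getD j ' ' = '1' then (1 : Int) else -1) else 0) := by
      intro j
      simp only [calcStep]
      rw [sget j]
      by_cases hj : j < e.toList.length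
      · rw [if_pos (by simp only [List.length_map]; omega), if_pos hj]
        congr 1
        rw [List.getD_eq_getElem _ _ (by simpa using hj), List.getElem_map,
          List.getD_eq_getElem _ _ hj]
        simp
      · rw [if_neg (by simp only [List.length_map]; omega), if_neg hj]
        simp
    simp only [List.foldl_cons]
    obtain ⟨rlen, rget⟩ := ih (calcStep g e) (fun x hx => hpre x (by simp [hx])) hstep_len
    refine ⟨rlen, fun j => ?_⟩
    rw [rget j, hstep_get j]
    simp [colsum]
    ring

-- ===== VERDICT (by name: the statement is the Claim_ definition above) =====
theorem calculate_g_e_spec : Claim_equal_calculate_g_e := by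
  intro entries _ hpre
  unfold Spec_calculate_g_e
  simp only [calculate_g_e, calculate_g_e_alt]
  obtain ⟨glen, gget⟩ := outer_fold entries (List.replicate 12 0) hpre (by simp)
  set gf := entries.foldl calcStep (List.replicate 12 0) with hgf
  have hgf_eq : gf = (List.range 12).map (fun j => colsum j entries) := by
    apply List.ext_getElem (by simp [glen])
    intro i h1 h2
    simp only [List.getElem_map, List.getElem_range]
    have hi : i < 12 := glen ▸ h1
    rw [← List.getD_eq_getElem gf 0 h1, gget i,
      List.getD_eq_getElem _ _ (show i < (List.replicate 12 (0 : Int)).length by simpa using hi),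
      List.getElem_replicate, zero_add]
  rw [hgf_eq]
  simp only [List.map_map]
  congr 1
  all_goals
    apply List.map_congr_left
    intro i _
    simp only [Function.comp, colsum_eq_count]
    split_ifs <;> first | rfl | omega
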